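-- pv_equiv track=rewrite | github.com/Jnn002/FullSpeedPython | General/listas/num_pares_impares.py | separador
-- ===== SOURCE A (Python) =====
-- def separador(numero):
--     # Definición de listas para nuestros números
--     pares = []
--     inpares = []
--     for num in range(numero):
--         if num % 2 == 0:
--             pares.append(num)
--         else:
--             inpares.append(num)
--     return pares, inpares
-- ===== SOURCE B (Python) =====
-- def separador(numero):
--     # Build both lists directly as arithmetic progressions: no loop, no branch.
--     return list(range(0, numero, 2)), list(range(1, numero, 2))
-- ===== Notes on version B (the rewrite author's own statement) =====
-- stated objective: idiomatic
-- what changed: Replaces the range(numero) loop with its parity branch by direct construction of the two lists as strided ranges range(0,numero,2) and range(1,numero,2).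
import Mathlib
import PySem

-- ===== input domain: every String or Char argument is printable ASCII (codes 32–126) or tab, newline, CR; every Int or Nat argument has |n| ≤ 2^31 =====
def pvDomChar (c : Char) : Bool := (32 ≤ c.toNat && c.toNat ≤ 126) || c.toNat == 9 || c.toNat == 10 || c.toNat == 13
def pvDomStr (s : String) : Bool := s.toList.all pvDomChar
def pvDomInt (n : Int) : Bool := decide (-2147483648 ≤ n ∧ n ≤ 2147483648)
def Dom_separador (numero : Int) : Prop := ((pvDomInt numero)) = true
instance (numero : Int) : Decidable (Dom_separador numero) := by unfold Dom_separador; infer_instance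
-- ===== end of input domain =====

-- B builds the even and odd lists directly as strided ranges instead of looping with a parity branch (idiomatic).


-- ===== PORT A =====
-- transliteration of A: loop over range(numero), branch on num % 2 == 0, appending
def sepStep (acc : List Int × List Int) (num : Int) : List Int × List Int :=
  if PySem.Int.mod num 2 == 0 then (acc.1 ++ [num], acc.2) else (acc.1, acc.2 ++ [num])

def separador (numero : Int) : List Int × List Int :=
  (PySem.List.pyRange 0 numero 1).foldl sepStep ([], [])

-- ===== PORT B =====
-- transliteration of B: the two strided ranges
def separador_alt (numero : Int) : List Int × List Int :=
  (PySem.List.pyRange 0 numero 2, PySem.List.pyRange 1 numero 2)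

-- ===== PRECONDITION & SPEC =====
def Spec_separador (numero : Int) (out : List Int × List Int) : Prop := out = separador_alt numero
instance (numero : Int) (out : List Int × List Int) : Decidable (Spec_separador numero out) := by unfold Spec_separador; infer_instance

-- ===== CLAIM (what is proved, stated in full; the proofs are below) =====
def Claim_equal_separador : Prop := ∀ (numero : Int), Dom_separador numero → Spec_separador numero (separador numero)

-- ===== LEMMAS AND PROOFS =====

-- ===== VERDICT (by name: the statement is the Claim_ definition above) =====
lemma evens_succ (n : Nat) :
    PySem.List.pyRange 0 ((n : Int) + 1) 2
      = PySem.List.pyRange 0 (n : Int) 2 ++ (if n % 2 = 0 then [(n : Int)] else []) := by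
  rw [PySem.List.pyRange_of_pos _ _ (by norm_num : (0:Int) < 2),
      PySem.List.pyRange_of_pos _ _ (by norm_num : (0:Int) < 2)]
  rcases Nat.even_or_odd n with ⟨m, rfl⟩ | ⟨m, rfl⟩
  · rw [if_pos (show (m + m) % 2 = 0 by omega),
        if_pos (show (0:Int) < ((m + m : Nat) : Int) + 1 by omega),
        (show ((((m + m : Nat) : Int) + 1 - 0 + 2 - 1) / 2).toNat = m + 1 by omega),
        (show (if (0:Int) < ((m + m : Nat) : Int)
            then ((((m + m : Nat) : Int) - 0 + 2 - 1) / 2).toNat else 0) = m by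
          split_ifs with h <;> omega),
        List.range_succ, List.map_append]
    simp only [List.map_cons, List.map_nil]
    rw [(show (0:Int) + 2 * (m : Int) = ((m + m : Nat) : Int) by omega)]
  · rw [if_neg (show ¬ (2 * m + 1) % 2 = 0 by omega), List.append_nil,
        if_pos (show (0:Int) < ((2 * m + 1 : Nat) : Int) + 1 by omega),
        (show ((((2 * m + 1 : Nat) : Int) + 1 - 0 + 2 - 1) / 2).toNat = m + 1 by omega),
        (show (if (0:Int) < ((2 * m + 1 : Nat) : Int)
            then ((((2 * m + 1 : Nat) : Int) - 0 + 2 - 1) / 2).toNat else 0) = m + 1 by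
          split_ifs with h <;> omega)]

lemma odds_succ (n : Nat) :
    PySem.List.pyRange 1 ((n : Int) + 1) 2
      = PySem.List.pyRange 1 (n : Int) 2 ++ (if n % 2 = 1 then [(n : Int)] else []) := by
  rw [PySem.List.pyRange_of_pos _ _ (by norm_num : (0:Int) < 2),
      PySem.List.pyRange_of_pos _ _ (by norm_num : (0:Int) < 2)]
  rcases Nat.even_or_odd n with ⟨m, rfl⟩ | ⟨m, rfl⟩
  · rw [if_neg (show ¬ (m + m) % 2 = 1 by omega), List.append_nil,
        (show (if (1:Int) < ((m + m : Nat) : Int) + 1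
            then ((((m + m : Nat) : Int) + 1 - 1 + 2 - 1) / 2).toNat else 0) = m by
          split_ifs with h <;> omega),
        (show (if (1:Int) < ((m + m : Nat) : Int)
            then ((((m + m : Nat) : Int) - 1 + 2 - 1) / 2).toNat else 0) = m by
          split_ifs with h <;> omega)]
  · rw [if_pos (show (2 * m + 1) % 2 = 1 by omega),
        if_pos (show (1:Int) < ((2 * m + 1 : Nat) : Int) + 1 by omega),
        (show ((((2 * m + 1 : Nat) : Int) + 1 - 1 + 2 - 1) / 2).toNat = m + 1 by omega),
        (show (if (1:Int) < ((2 * m + 1 : Nat) : Int)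
            then ((((2 * m + 1 : Nat) : Int) - 1 + 2 - 1) / 2).toNat else 0) = m by
          split_ifs with h <;> omega),
        List.range_succ, List.map_append]
    simp only [List.map_cons, List.map_nil]
    rw [(show (1:Int) + 2 * (m : Int) = ((2 * m + 1 : Nat) : Int) by omega)]

lemma main_loop (n : Nat) (p q : List Int) :
    (PySem.List.pyRange 0 (n : Int) 1).foldl sepStep (p, q)
      = (p ++ PySem.List.pyRange 0 (n : Int) 2, q ++ PySem.List.pyRange 1 (n : Int) 2) := by
  induction n generalizing p q with
  | zero =>
    simp [PySem.List.pyRange_one_eq_nil (by omega : (0:Int) ≤ 0),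
      PySem.List.pyRange_of_pos _ _ (by norm_num : (0:Int) < 2)]
  | succ n ih =>
    rw [(by push_cast; ring : ((n + 1 : Nat) : Int) = (n : Int) + 1),
        PySem.List.pyRange_one_succ_right (by omega), List.foldl_append, ih,
        evens_succ, odds_succ]
    simp only [List.foldl_cons, List.foldl_nil, sepStep]
    rcases Nat.even_or_odd n with ⟨m, rfl⟩ | ⟨m, rfl⟩
    · rw [if_pos (by simp only [beq_iff_eq, PySem.Int.mod_eq_zero_iff_dvd]; omega),
          if_pos (by omega), if_neg (by omega)]
      simp
    · rw [if_neg (by simp only [beq_iff_eq, PySem.Int.mod_eq_zero_iff_dvd]; omega),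
          if_neg (by omega), if_pos (by omega)]
      simp

theorem separador_spec : Claim_equal_separador := by
  intro numero _
  unfold Spec_separador separador separador_alt
  by_cases h : 0 ≤ numero
  · obtain ⟨n, rfl⟩ := Int.eq_ofNat_of_zero_le h
    rw [main_loop]
    simp
  · rw [PySem.List.pyRange_one_eq_nil (by omega),
      PySem.List.pyRange_of_pos _ _ (by norm_num : (0:Int) < 2),
      PySem.List.pyRange_of_pos _ _ (by norm_num : (0:Int) < 2)]
    simp only [List.foldl_nil, if_neg (by omega : ¬ (0:Int) < numero),
      if_neg (by omega : ¬ (1:Int) < numero), List.range_zero, List.map_nil]
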